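-- pv_equiv track=rewrite | github.com/Berlyli866/CS1301 | HW06/HW06.py | class_finder
-- ===== SOURCE A (Python) =====
-- from collections import defaultdict
--
-- def class_finder(course,friend):
--     goodclass=[]
--     count=defaultdict(list)
--     for item in course.keys():
--         for name in friend:
--             if name in course[item]:
--                 count.setdefault(item, []).append(name)
--     d = dict((item, tuple(name)) for item, name in count.items())
--     for item in d.keys():
--         if len(d[item])>=2:
--             goodclass.append(item)
--     return goodclass
-- ===== SOURCE B (Python) =====
-- def class_finder(course, friend):
--     # Invert the enrollment once: student name -> list of courses that contain the student.
--     # Then count per course by walking each friend's course list via the index; no roster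
--     # membership test happens during counting.
--     enrolled = {}
--     for item in course:
--         for name in dict.fromkeys(course[item]):
--             enrolled.setdefault(name, []).append(item)
--     tally = {}
--     for name in friend:
--         for item in enrolled.get(name, []):
--             tally[item] = tally.get(item, 0) + 1
--     return [item for item in course if tally.get(item, 0) >= 2]
-- ===== Notes on version B (the rewrite author's own statement) =====
-- stated objective: faster
-- what changed: Replaces A's per-course scan of the friend list (with a defaultdict of matched names, a tuple-converting dict and a second filtering loop) by an inverted index student->courses built once from the rosters, a counter incremented per friend through dict lookups in that index, and a final pass keeping courses with tally >= 2.
import Mathlib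
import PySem

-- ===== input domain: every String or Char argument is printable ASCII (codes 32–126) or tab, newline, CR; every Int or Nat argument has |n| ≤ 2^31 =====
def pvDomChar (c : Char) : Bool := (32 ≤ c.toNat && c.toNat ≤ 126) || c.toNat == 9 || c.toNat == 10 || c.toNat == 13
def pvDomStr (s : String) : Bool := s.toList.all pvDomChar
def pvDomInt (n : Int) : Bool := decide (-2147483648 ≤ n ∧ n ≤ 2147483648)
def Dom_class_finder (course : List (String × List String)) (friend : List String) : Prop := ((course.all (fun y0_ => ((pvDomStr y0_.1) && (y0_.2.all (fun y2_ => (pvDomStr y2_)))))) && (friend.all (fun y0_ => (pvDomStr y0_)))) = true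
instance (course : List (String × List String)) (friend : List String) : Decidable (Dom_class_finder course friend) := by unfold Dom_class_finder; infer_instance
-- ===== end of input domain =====

-- B replaces A's per-course scan of the friend list by an inverted index student→courses
-- built once, a counter bumped per friend through that index, and a final tally≥2 pass
-- (objective: faster -- counting does no roster scans; measured faster in a timing run).

-- 'course[item]' under the dict-as-association-list convention: first match, default [].
-- (Both ports access the course dict this way; item always comes from the key list.)
def pvLookup (course : List (String × List String)) (item : String) : List String :=
  (((course.find? (fun p => p.1 == item)).map (·.2)).getD [])

-- ===== PORT A =====
def class_finder (course : List (String × List String)) (friend : List String) : List String :=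
  -- course.keys(): the distinct keys in insertion order
  let keys := PySem.Set.ofList (course.map (·.1))
  -- count=defaultdict(list); for item in course.keys(): for name in friend:
  --   if name in course[item]: count.setdefault(item, []).append(name)
  -- (setdefault+append at a key ≡ Dict.modify item [] (· ++ [name]))
  let count : PySem.Dict String (List String) :=
    keys.foldl (fun cnt item =>
      friend.foldl (fun cnt name =>
        if name ∈ pvLookup course item then cnt.modify item [] (· ++ [name]) else cnt) cnt)
      PySem.Dict.empty
  -- d = dict((item, tuple(name)) for item, name in count.items())  (a tuple of strings stays a List String)
  let d : PySem.Dict String (List String) := PySem.Dict.ofList count.items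
  -- for item in d.keys(): if len(d[item])>=2: goodclass.append(item)
  d.keys.foldl (fun goodclass item =>
    if 2 ≤ (d.getD item []).length then goodclass ++ [item] else goodclass) []

-- ===== PORT B =====
def class_finder_alt (course : List (String × List String)) (friend : List String) : List String :=
  -- for item in course: for name in dict.fromkeys(course[item]): enrolled.setdefault(name,[]).append(item)
  let keys := PySem.Set.ofList (course.map (·.1))
  let enrolled : PySem.Dict String (List String) :=
    keys.foldl (fun e item =>
      (PySem.List.dedup (pvLookup course item)).foldl
        (fun e name => e.modify name [] (· ++ [item])) e)
      PySem.Dict.empty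
  -- for name in friend: for item in enrolled.get(name, []): tally[item] = tally.get(item, 0) + 1
  let tally : PySem.Dict String Int :=
    friend.foldl (fun t name =>
      (enrolled.getD name []).foldl (fun t item => t.insert item (t.getD item 0 + 1)) t)
      PySem.Dict.empty
  -- [item for item in course if tally.get(item, 0) >= 2]
  keys.filter (fun item => decide (2 ≤ tally.getD item 0))

-- ===== PRECONDITION & SPEC =====
def Spec_class_finder (course : List (String × List String)) (friend : List String) (out : List String) : Prop := out = class_finder_alt course friend
instance (course : List (String × List String)) (friend : List String) (out : List String) : Decidable (Spec_class_finder course friend out) := by unfold Spec_class_finder; infer_instance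

-- ===== CLAIM (what is proved, stated in full; the proofs are below) =====
def Claim_equal_class_finder : Prop := ∀ (course : List (String × List String)) (friend : List String), Dom_class_finder course friend → Spec_class_finder course friend (class_finder course friend)

-- ===== LEMMAS AND PROOFS =====

-- the common reference value: courses (in key order) containing at least two friends
def pvSpecList (course : List (String × List String)) (friend : List String) : List String :=
  (PySem.Set.ofList (course.map (·.1))).filter
    (fun item => decide (2 ≤ friend.countP (fun name => decide (name ∈ pvLookup course item))))

-- the matched-friend list A accumulates for a course
def pvFlt (course : List (String × List String)) (friend : List String) (item : String) : List String :=
  friend.filter (fun n => decide (n ∈ pvLookup course item))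

-- ---------- A-side lemmas ----------

-- inner loop over friend: lookup afterwards
theorem pv_inner_getD (course : List (String × List String)) (item c : String)
    (fl : List String) (cnt : PySem.Dict String (List String)) :
    ((fl.foldl (fun cnt name =>
        if name ∈ pvLookup course item then cnt.modify item [] (· ++ [name]) else cnt) cnt).getD c [])
    = cnt.getD c [] ++ (if c = item then fl.filter (fun n => decide (n ∈ pvLookup course item)) else []) := by
  induction fl generalizing cnt with
  | nil => simp
  | cons n ns ih =>
    by_cases h : n ∈ pvLookup course item
    · simp only [List.foldl_cons, if_pos h, ih, PySem.Dict.getD_modify, List.filter_cons,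
        decide_eq_true h]
      by_cases hc : c = item <;> simp [hc]
    · simp only [List.foldl_cons, if_neg h, ih, List.filter_cons, decide_eq_false h]
      simp

-- inner loop over friend: keys afterwards
theorem pv_inner_keys (course : List (String × List String)) (item : String)
    (fl : List String) (cnt : PySem.Dict String (List String)) :
    ((fl.foldl (fun cnt name =>
        if name ∈ pvLookup course item then cnt.modify item [] (· ++ [name]) else cnt) cnt).keys)
    = if fl.filter (fun n => decide (n ∈ pvLookup course item)) = [] then cnt.keys
      else (if item ∈ cnt.keys then cnt.keys else cnt.keys ++ [item]) := by
  induction fl generalizing cnt with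
  | nil => simp
  | cons n ns ih =>
    by_cases h : n ∈ pvLookup course item
    · simp only [List.foldl_cons, if_pos h, ih, List.filter_cons, decide_eq_true h]
      have hk : (cnt.modify item [] (· ++ [n])).keys
          = if item ∈ cnt.keys then cnt.keys else cnt.keys ++ [item] := by
        rw [PySem.Dict.keys_modify]
        by_cases hm : item ∈ cnt.keys
        · rw [PySem.Dict.keys_insert_of_contains]
          · simp [hm]
          · exact (PySem.Dict.contains_iff_mem_keys _ _).mpr hm
        · rw [PySem.Dict.keys_insert_of_not_contains]
          · simp [hm]
          · cases hcon : cnt.contains item with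
            | false => rfl
            | true => exact absurd ((PySem.Dict.contains_iff_mem_keys _ _).mp hcon) hm
      have hmem : item ∈ (cnt.modify item [] (· ++ [n])).keys := by
        rw [hk]
        split_ifs with hm
        · exact hm
        · simp
      rw [if_pos hmem, hk]
      by_cases hfil : ns.filter (fun n => decide (n ∈ pvLookup course item)) = [] <;>
        simp [hfil]
    · simp only [List.foldl_cons, if_neg h, ih, List.filter_cons, decide_eq_false h]
      simp

-- outer loop over the course keys: lookup afterwards
theorem pv_outer_getD (course : List (String × List String)) (friend : List String)
    (ks : List String) (c : String) (cnt : PySem.Dict String (List String)) (hnd : ks.Nodup) :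
    ((ks.foldl (fun cnt item =>
        friend.foldl (fun cnt name =>
          if name ∈ pvLookup course item then cnt.modify item [] (· ++ [name]) else cnt) cnt) cnt).getD c [])
    = cnt.getD c [] ++ (if c ∈ ks then pvFlt course friend c else []) := by
  induction ks generalizing cnt with
  | nil => simp
  | cons k ks ih =>
    simp only [List.nodup_cons] at hnd
    rw [List.foldl_cons, ih _ hnd.2, pv_inner_getD]
    by_cases hc : c = k
    · subst hc
      simp [hnd.1, pvFlt]
    · simp [hc, List.mem_cons]

-- outer loop over the course keys: keys afterwards
theorem pv_outer_keys (course : List (String × List String)) (friend : List String)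
    (ks : List String) (cnt : PySem.Dict String (List String)) (hnd : ks.Nodup)
    (hfresh : ∀ k ∈ ks, k ∉ cnt.keys) :
    ((ks.foldl (fun cnt item =>
        friend.foldl (fun cnt name =>
          if name ∈ pvLookup course item then cnt.modify item [] (· ++ [name]) else cnt) cnt) cnt).keys)
    = cnt.keys ++ ks.filter (fun k => decide (pvFlt course friend k ≠ [])) := by
  induction ks generalizing cnt with
  | nil => simp
  | cons k ks ih =>
    simp only [List.nodup_cons] at hnd
    have hkeys := pv_inner_keys course k friend cnt
    have hknot : k ∉ cnt.keys := hfresh k (List.mem_cons_self ..)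
    rw [List.foldl_cons, ih _ hnd.2, hkeys]
    · by_cases hfil : friend.filter (fun n => decide (n ∈ pvLookup course k)) = []
      · have hdk : decide (pvFlt course friend k ≠ []) = false := by simp [pvFlt, hfil]
        rw [if_pos hfil]
        simp only [List.filter_cons, hdk]
        simp
      · have hdk : decide (pvFlt course friend k ≠ []) = true := by simp [pvFlt, hfil]
        rw [if_neg hfil, if_neg hknot]
        simp only [List.filter_cons, hdk]
        simp
    · intro k' hk'
      rw [hkeys]
      have hk'cnt := hfresh k' (List.mem_cons_of_mem _ hk')
      have hne : k' ≠ k := fun h => hnd.1 (h ▸ hk')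
      by_cases hfil : friend.filter (fun n => decide (n ∈ pvLookup course k)) = [] <;>
        by_cases hm : k ∈ cnt.keys <;> simp [hfil, hm, hk'cnt, hne]

-- d = dict(count.items()) rebuilds the same dict when keys are unique
theorem pv_ofList_items (count : PySem.Dict String (List String))
    (hnd : count.keys.Nodup) : PySem.Dict.ofList count.items = count := by
  apply PySem.Dict.ext
  have h := PySem.Dict.items_foldl_insert_fresh (κ := String) (ν := List String)
    count.items (·.1) (·.2) PySem.Dict.empty
    (by intro a _; exact PySem.Dict.contains_empty _)
    (by simpa [PySem.Dict.keys] using hnd)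
  have hof : PySem.Dict.ofList count.items
      = count.items.foldl (fun d a => d.insert a.1 a.2) PySem.Dict.empty := rfl
  rw [hof]
  simpa using h

theorem class_finder_eq_spec (course : List (String × List String)) (friend : List String) :
    class_finder course friend = pvSpecList course friend := by
  unfold class_finder pvSpecList
  dsimp only
  set keys := PySem.Set.ofList (course.map (·.1)) with hkeysdef
  have hnd : keys.Nodup := PySem.Set.nodup_ofList _
  set count : PySem.Dict String (List String) :=
    keys.foldl (fun cnt item =>
      friend.foldl (fun cnt name =>
        if name ∈ pvLookup course item then cnt.modify item [] (· ++ [name]) else cnt) cnt)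
      PySem.Dict.empty with hcount
  have hck : count.keys = keys.filter (fun k => decide (pvFlt course friend k ≠ [])) := by
    rw [hcount, pv_outer_keys course friend keys PySem.Dict.empty hnd (by simp [PySem.Dict.keys_empty])]
    simp [PySem.Dict.keys_empty]
  have hcg : ∀ c, count.getD c [] = if c ∈ keys then pvFlt course friend c else [] := by
    intro c
    rw [hcount, pv_outer_getD course friend keys c PySem.Dict.empty hnd]
    simp [PySem.Dict.getD_empty]
  have hd : PySem.Dict.ofList count.items = count := by
    apply pv_ofList_items
    rw [hck]; exact hnd.filter _
  rw [hd]
  rw [PySem.List.foldl_append_ite_eq_filter (fun item => 2 ≤ (count.getD item []).length) count.keys []]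
  rw [List.nil_append, hck, List.filter_filter]
  apply List.filter_congr
  intro k hk
  rw [hcg k, if_pos hk]
  have hlen : (friend.countP (fun name => decide (name ∈ pvLookup course k)))
      = (pvFlt course friend k).length := List.countP_eq_length_filter
  rw [hlen]
  rcases h0 : pvFlt course friend k with _ | ⟨a, l⟩
  · simp
  · simp [Nat.succ_le_iff]

-- ---------- B-side lemmas ----------

-- inner index loop over one (deduplicated) roster: lookup in enrolled afterwards
theorem pv_idx_inner_getD (item n : String) (rs : List String) (hnd : rs.Nodup)
    (e : PySem.Dict String (List String)) :
    ((rs.foldl (fun e name => e.modify name [] (· ++ [item])) e).getD n [])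
    = e.getD n [] ++ (if n ∈ rs then [item] else []) := by
  induction rs generalizing e with
  | nil => simp
  | cons r rs ih =>
    simp only [List.nodup_cons] at hnd
    rw [List.foldl_cons, ih hnd.2, PySem.Dict.getD_modify]
    by_cases hn : n = r
    · subst hn
      simp [hnd.1]
    · simp [hn, List.mem_cons]

-- outer index loop over the course keys: enrolled[n] = courses containing n, in key order
theorem pv_idx_outer_getD (course : List (String × List String)) (ks : List String) (n : String)
    (e : PySem.Dict String (List String)) :
    ((ks.foldl (fun e item =>
        (PySem.List.dedup (pvLookup course item)).foldl
          (fun e name => e.modify name [] (· ++ [item])) e) e).getD n [])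
    = e.getD n [] ++ ks.filter (fun k => decide (n ∈ pvLookup course k)) := by
  induction ks generalizing e with
  | nil => simp
  | cons k ks ih =>
    rw [List.foldl_cons, ih, pv_idx_inner_getD k n _ (PySem.List.nodup_dedup _) e]
    rw [List.filter_cons]
    by_cases hm : n ∈ pvLookup course k
    · simp [hm]
    · simp [hm]

-- inner tally loop over one friend's course list
theorem pv_tally_inner_getD (cs : List String) (c : String) (t : PySem.Dict String Int) :
    ((cs.foldl (fun t item => t.insert item (t.getD item 0 + 1)) t).getD c 0)
    = t.getD c 0 + cs.count c :=
  PySem.Dict.getD_foldl_insert_add_one cs t c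

-- outer tally loop over friend
theorem pv_tally_outer_getD (enrolled : PySem.Dict String (List String)) (fl : List String)
    (c : String) (t : PySem.Dict String Int) :
    ((fl.foldl (fun t name =>
        (enrolled.getD name []).foldl (fun t item => t.insert item (t.getD item 0 + 1)) t) t).getD c 0)
    = t.getD c 0 + ((fl.map (fun n => ((enrolled.getD n []).count c : Int))).sum) := by
  induction fl generalizing t with
  | nil => simp
  | cons n ns ih =>
    rw [List.foldl_cons, ih, pv_tally_inner_getD]
    simp only [List.map_cons, List.sum_cons]
    ring

-- count of c in a filtered nodup key list is a 0/1 indicator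
theorem pv_count_filter (ks : List String) (hnd : ks.Nodup) (p : String → Bool) (c : String)
    (hc : c ∈ ks) : (ks.filter p).count c = if p c then 1 else 0 := by
  by_cases hp : p c
  · rw [if_pos hp, List.count_eq_one_of_mem ((hnd.filter p)) (List.mem_filter.mpr ⟨hc, hp⟩)]
  · rw [if_neg hp, List.count_eq_zero]
    intro h
    exact hp (List.mem_filter.mp h).2

theorem class_finder_alt_eq_spec (course : List (String × List String)) (friend : List String) :
    class_finder_alt course friend = pvSpecList course friend := by
  unfold class_finder_alt pvSpecList
  dsimp only
  set keys := PySem.Set.ofList (course.map (·.1)) with hkeysdef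
  have hnd : keys.Nodup := PySem.Set.nodup_ofList _
  apply List.filter_congr
  intro c hc
  -- tally.getD c 0 = number of friends enrolled in c
  rw [pv_tally_outer_getD]
  rw [PySem.Dict.getD_empty, zero_add]
  have hcnt : ∀ n : String,
      (((keys.foldl (fun e item =>
          (PySem.List.dedup (pvLookup course item)).foldl
            (fun e name => e.modify name [] (· ++ [item])) e) PySem.Dict.empty).getD n []).count c : Int)
      = if decide (n ∈ pvLookup course c) then (1 : Int) else 0 := by
    intro n
    rw [pv_idx_outer_getD course keys n PySem.Dict.empty]
    rw [PySem.Dict.getD_empty, List.nil_append]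
    rw [pv_count_filter keys hnd _ c hc]
    split_ifs <;> simp
  rw [List.map_congr_left (fun n _ => hcnt n)]
  have hsum : ((friend.map (fun n => if decide (n ∈ pvLookup course c) then (1 : Int) else 0)).sum)
      = (friend.countP (fun n => decide (n ∈ pvLookup course c)) : Int) := by
    induction friend with
    | nil => simp
    | cons f fs ih =>
      rw [List.map_cons, List.sum_cons, ih, List.countP_cons]
      by_cases hf : (decide (f ∈ pvLookup course c)) = true <;> simp [hf] <;> ring
  rw [hsum]
  simp only [decide_eq_decide]
  exact_mod_cast Iff.rfl

-- ===== VERDICT (by name: the statement is the Claim_ definition above) =====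
theorem class_finder_spec : Claim_equal_class_finder := by
  intro course friend _
  unfold Spec_class_finder
  rw [class_finder_eq_spec, class_finder_alt_eq_spec]
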